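-- pv_equiv track=rewrite | github.com/gSimani/ConcordBroker | railway-deploy/unified_search_service.py | _format_autocomplete_display
-- ===== SOURCE A (Python) =====
-- from typing import List, Dict, Optional, Any, Tuple
--
-- def _format_autocomplete_display(item: Dict, scope: str = 'property_address') -> str:
--     """
--     Format result for autocomplete display.
--     """
--     if scope == 'property_address':
--         address = item.get('phy_addr1', '')
--         city = item.get('phy_city', '')
--         county = item.get('county', '')
--         parts = [part for part in [address, city, county] if part]
--     elif scope == 'property_owner':
--         owner = item.get('owner_name', '')
--         address = item.get('phy_addr1', '')
--         county = item.get('county', '')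
--         parts = [part for part in [owner, address, county] if part]
--     elif scope == 'company':
--         name = item.get('entity_name', '')
--         address = item.get('entity_address', '')
--         city = item.get('entity_city', '')
--         parts = [part for part in [name, address, city] if part]
--     elif scope == 'officer':
--         name = item.get('officer_name', '')
--         title = item.get('officer_title', '')
--         company = item.get('entity_name', '')
--         parts = [part for part in [name, title, company] if part]
--     else:
--         # Fallback to first few fields
--         parts = [str(v) for k, v in list(item.items())[:3] if v]
--
--     return ', '.join(parts)
-- ===== SOURCE B (Python) =====
-- # Different traversal: one pass over the item's entries filling positional slots,
-- # instead of A's per-key dict lookups (alternative decomposition; same cost).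
-- _SLOT_KEYS = {
--     'property_address': ['phy_addr1', 'phy_city', 'county'],
--     'property_owner': ['owner_name', 'phy_addr1', 'county'],
--     'company': ['entity_name', 'entity_address', 'entity_city'],
--     'officer': ['officer_name', 'officer_title', 'entity_name'],
-- }
--
-- def _format_autocomplete_display(item, scope='property_address'):
--     keys = _SLOT_KEYS.get(scope)
--     if keys is None:
--         # Fallback to first few fields
--         parts = [str(v) for k, v in list(item.items())[:3] if v]
--     else:
--         slots = [''] * len(keys)
--         for k, v in item.items():
--             if k in keys:
--                 slots[keys.index(k)] = v
--         parts = [s for s in slots if s]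
--     return ', '.join(parts)
-- ===== Notes on version B (the rewrite author's own statement) =====
-- stated objective: alternative
-- what changed: B scans the item's entries once, filling positional slots whenever an entry's key is one of the scope's wanted keys (found via a scope->keys table), instead of A's branch-per-scope code doing three per-key dict lookups; the fallback branch is unchanged.
import Mathlib
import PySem

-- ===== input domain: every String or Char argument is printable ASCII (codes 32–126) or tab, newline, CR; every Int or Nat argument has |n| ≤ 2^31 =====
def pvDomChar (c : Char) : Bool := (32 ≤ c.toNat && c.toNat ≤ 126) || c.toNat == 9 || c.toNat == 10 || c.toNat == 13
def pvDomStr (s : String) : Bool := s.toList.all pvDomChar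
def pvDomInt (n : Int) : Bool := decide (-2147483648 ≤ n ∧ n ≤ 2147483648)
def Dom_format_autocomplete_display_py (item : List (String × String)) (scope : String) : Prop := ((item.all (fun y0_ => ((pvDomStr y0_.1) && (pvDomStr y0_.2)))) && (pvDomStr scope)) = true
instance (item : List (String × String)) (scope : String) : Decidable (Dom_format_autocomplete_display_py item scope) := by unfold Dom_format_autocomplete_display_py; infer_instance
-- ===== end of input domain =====

-- B replaces A's per-key lookups with one pass over the item's entries filling positional slots (alternative decomposition; same cost).

-- ===== PORT A =====
-- The dict argument is modelled as PySem.Dict.ofList item (Python dict construction from the pairs).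
def format_autocomplete_display_py (item : List (String × String)) (scope : String) : String :=
  let d := PySem.Dict.ofList item
  let parts : List String :=
    if scope == "property_address" then
      let address := d.getD "phy_addr1" ""
      let city := d.getD "phy_city" ""
      let county := d.getD "county" ""
      ([address, city, county]).filter (fun part => !(part == ""))
    else if scope == "property_owner" then
      let owner := d.getD "owner_name" ""
      let address := d.getD "phy_addr1" ""
      let county := d.getD "county" ""
      ([owner, address, county]).filter (fun part => !(part == ""))
    else if scope == "company" then
      let name := d.getD "entity_name" ""
      let address := d.getD "entity_address" ""
      let city := d.getD "entity_city" ""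
      ([name, address, city]).filter (fun part => !(part == ""))
    else if scope == "officer" then
      let name := d.getD "officer_name" ""
      let title := d.getD "officer_title" ""
      let company := d.getD "entity_name" ""
      ([name, title, company]).filter (fun part => !(part == ""))
    else
      -- [str(v) for k, v in list(item.items())[:3] if v]; str(v) = v on strings
      (PySem.List.slice d.items none (some 3)).filterMap
        (fun kv => if !(kv.2 == "") then some kv.2 else none)
  PySem.Str.join ", " parts

-- ===== PORT B =====
def pvSlotKeys : PySem.Dict String (List String) :=
  PySem.Dict.ofList
    [("property_address", ["phy_addr1", "phy_city", "county"]),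
     ("property_owner", ["owner_name", "phy_addr1", "county"]),
     ("company", ["entity_name", "entity_address", "entity_city"]),
     ("officer", ["officer_name", "officer_title", "entity_name"])]

def format_autocomplete_display_py_alt (item : List (String × String)) (scope : String) : String :=
  let d := PySem.Dict.ofList item
  let parts : List String :=
    match pvSlotKeys.get? scope with
    | none =>
      -- Fallback to first few fields, verbatim from A
      (PySem.List.slice d.items none (some 3)).filterMap
        (fun kv => if !(kv.2 == "") then some kv.2 else none)
    | some keys =>
      -- slots = [''] * len(keys); for k, v in item.items(): if k in keys: slots[keys.index(k)] = v
      -- (k in keys guarantees the index exists, so keys.index(k) = List.idxOf and the store is in range)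
      let slots := List.replicate keys.length ""
      let slots := d.items.foldl
        (fun slots kv => if keys.contains kv.1 then slots.set (keys.idxOf kv.1) kv.2 else slots) slots
      slots.filter (fun s => !(s == ""))
  PySem.Str.join ", " parts

-- ===== PRECONDITION & SPEC =====
def Spec_format_autocomplete_display_py (item : List (String × String)) (scope : String) (out : String) : Prop := out = format_autocomplete_display_py_alt item scope
instance (item : List (String × String)) (scope : String) (out : String) : Decidable (Spec_format_autocomplete_display_py item scope out) := by unfold Spec_format_autocomplete_display_py; infer_instance

-- ===== CLAIM (what is proved, stated in full; the proofs are below) =====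
def Claim_equal_format_autocomplete_display_py : Prop := ∀ (item : List (String × String)) (scope : String), Dom_format_autocomplete_display_py item scope → Spec_format_autocomplete_display_py item scope (format_autocomplete_display_py item scope)

-- ===== LEMMAS AND PROOFS =====

-- A fold that only overwrites on key k leaves the state unchanged when k never occurs.
theorem pv_foldl_keep (l : List (String × String)) (k : String)
    (h : ∀ p ∈ l, p.1 ≠ k) (s : String) :
    l.foldl (fun s p => if p.1 = k then p.2 else s) s = s := by
  induction l generalizing s with
  | nil => rfl
  | cons p t ih =>
    simp only [List.foldl_cons]
    rw [if_neg (h p (by simp))]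
    exact ih (fun q hq => h q (by simp [hq])) s

-- Last-write-wins fold over a list with distinct keys = first-match dict lookup.
theorem pv_foldl_eq_get? (l : List (String × String))
    (hnd : (l.map Prod.fst).Nodup) (k : String) (s : String) :
    l.foldl (fun s p => if p.1 = k then p.2 else s) s
      = ((PySem.Dict.mk l).get? k).getD s := by
  induction l generalizing s with
  | nil => simp [PySem.Dict.get?]
  | cons p t ih =>
    rw [PySem.Dict.get?_mk_cons]
    simp only [List.foldl_cons]
    by_cases hp : p.1 = k
    · rw [if_pos hp, show (p.1 == k) = true from beq_iff_eq.mpr hp, if_pos rfl,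
        Option.getD_some]
      have hnot : ∀ q ∈ t, q.1 ≠ k := by
        intro q hq e
        exact (List.nodup_cons.mp hnd).1 (hp ▸ e ▸ List.mem_map_of_mem hq)
      exact pv_foldl_keep t k hnot p.2
    · rw [if_neg hp, show (p.1 == k) = false from beq_eq_false_iff_ne.mpr hp,
        if_neg (by simp)]
      exact ih (List.nodup_cons.mp hnd).2 s

-- One slot-filling pass over three pairwise-distinct keys computes the three lookups positionally.
theorem pv_slot3 (k1 k2 k3 : String) (h12 : k1 ≠ k2) (h13 : k1 ≠ k3) (h23 : k2 ≠ k3)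
    (l : List (String × String)) (a b c : String) :
    l.foldl (fun slots kv =>
        if ([k1, k2, k3]).contains kv.1 then slots.set (([k1, k2, k3]).idxOf kv.1) kv.2 else slots)
      [a, b, c]
      = [l.foldl (fun s p => if p.1 = k1 then p.2 else s) a,
         l.foldl (fun s p => if p.1 = k2 then p.2 else s) b,
         l.foldl (fun s p => if p.1 = k3 then p.2 else s) c] := by
  induction l generalizing a b c with
  | nil => rfl
  | cons p t ih =>
    simp only [List.foldl_cons]
    by_cases e1 : p.1 = k1
    · subst e1
      rw [show ([p.1, k2, k3].contains p.1) = true from by simp, if_pos rfl,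
          show List.idxOf p.1 [p.1, k2, k3] = 0 from by simp,
          show ([a, b, c].set 0 p.2) = [p.2, b, c] from rfl,
          if_pos rfl, if_neg h12, if_neg h13]
      exact ih p.2 b c
    · by_cases e2 : p.1 = k2
      · subst e2
        rw [show ([k1, p.1, k3].contains p.1) = true from by simp, if_pos rfl,
            show List.idxOf p.1 [k1, p.1, k3] = 1 from by
              simp [h12],
            show ([a, b, c].set 1 p.2) = [a, p.2, c] from rfl,
            if_neg (Ne.symm h12), if_pos rfl, if_neg h23]
        exact ih a p.2 c
      · by_cases e3 : p.1 = k3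
        · subst e3
          rw [show ([k1, k2, p.1].contains p.1) = true from by simp, if_pos rfl,
              show List.idxOf p.1 [k1, k2, p.1] = 2 from by
                simp [h13, h23],
              show ([a, b, c].set 2 p.2) = [a, b, p.2] from rfl,
              if_neg (Ne.symm h13), if_neg (Ne.symm h23), if_pos rfl]
          exact ih a b p.2
        · rw [show ([k1, k2, k3].contains p.1) = false from by simp [e1, e2, e3],
              if_neg (by simp), if_neg e1, if_neg e2, if_neg e3]
          exact ih a b c

-- The slot pass over a dict's items yields exactly the three .get lookups with default ''.
theorem pv_slots_eq_getD (item : List (String × String)) (k1 k2 k3 : String)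
    (h12 : k1 ≠ k2) (h13 : k1 ≠ k3) (h23 : k2 ≠ k3) :
    ((PySem.Dict.ofList item).items).foldl
        (fun slots kv =>
          if ([k1, k2, k3]).contains kv.1 then slots.set (([k1, k2, k3]).idxOf kv.1) kv.2 else slots)
        (List.replicate ([k1, k2, k3]).length "")
      = [(PySem.Dict.ofList item).getD k1 "", (PySem.Dict.ofList item).getD k2 "",
         (PySem.Dict.ofList item).getD k3 ""] := by
  have hnd : (((PySem.Dict.ofList item).items).map Prod.fst).Nodup := by
    have := PySem.Dict.nodup_keys_ofList (ps := item)
    simpa [PySem.Dict.keys] using this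
  have hmk : PySem.Dict.mk ((PySem.Dict.ofList item).items) = PySem.Dict.ofList item := rfl
  rw [show (List.replicate ([k1, k2, k3]).length "") = ["", "", ""] from rfl,
      pv_slot3 k1 k2 k3 h12 h13 h23,
      pv_foldl_eq_get? _ hnd k1, pv_foldl_eq_get? _ hnd k2, pv_foldl_eq_get? _ hnd k3,
      hmk]
  simp [PySem.Dict.getD_eq_get?_getD]

-- ===== VERDICT (by name: the statement is the Claim_ definition above) =====
theorem format_autocomplete_display_py_spec : Claim_equal_format_autocomplete_display_py := by
  intro item scope _
  unfold Spec_format_autocomplete_display_py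
  unfold format_autocomplete_display_py format_autocomplete_display_py_alt
  by_cases h1 : scope = "property_address"
  · subst h1
    rw [show pvSlotKeys.get? "property_address" = some ["phy_addr1", "phy_city", "county"] from rfl]
    simp only []
    rw [pv_slots_eq_getD item "phy_addr1" "phy_city" "county" (by decide) (by decide) (by decide)]
    rfl
  · by_cases h2 : scope = "property_owner"
    · subst h2
      rw [show pvSlotKeys.get? "property_owner" = some ["owner_name", "phy_addr1", "county"] from rfl]
      simp only []
      rw [pv_slots_eq_getD item "owner_name" "phy_addr1" "county" (by decide) (by decide) (by decide)]
      rfl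
    · by_cases h3 : scope = "company"
      · subst h3
        rw [show pvSlotKeys.get? "company" = some ["entity_name", "entity_address", "entity_city"] from rfl]
        simp only []
        rw [pv_slots_eq_getD item "entity_name" "entity_address" "entity_city" (by decide) (by decide) (by decide)]
        rfl
      · by_cases h4 : scope = "officer"
        · subst h4
          rw [show pvSlotKeys.get? "officer" = some ["officer_name", "officer_title", "entity_name"] from rfl]
          simp only []
          rw [pv_slots_eq_getD item "officer_name" "officer_title" "entity_name" (by decide) (by decide) (by decide)]
          rfl
        · have e : pvSlotKeys.get? scope = none := by
            rw [show pvSlotKeys = PySem.Dict.mk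
              [("property_address", ["phy_addr1", "phy_city", "county"]),
               ("property_owner", ["owner_name", "phy_addr1", "county"]),
               ("company", ["entity_name", "entity_address", "entity_city"]),
               ("officer", ["officer_name", "officer_title", "entity_name"])] from rfl]
            simp [Ne.symm h1, Ne.symm h2, Ne.symm h3, Ne.symm h4, PySem.Dict.get?]
          rw [e]
          simp [h1, h2, h3, h4]
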